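-- pv_equiv track=rewrite | github.com/jimmybeam3000/Working | Smartv7_LBT_.py | calc_min_games
-- ===== SOURCE A (Python) =====
-- def calc_min_games(pts, hh=False):
--     """Calculate minimum games needed for given points."""
--     if pts <= 0:
--         return 0
--     mult = 2 if hh else 1
--     remaining = pts // mult
--     g = remaining // 72
--     remaining -= g * 72
--     best = None
--     for a in range(0, remaining // 36 + 2):
--         for b in range(0, remaining // 24 + 2):
--             rem = remaining - a*36 - b*24
--             if rem < 0:
--                 break
--             if rem % 12 == 0:
--                 c = rem // 12
--                 total = g + a + b + c
--                 best = total if best is None or total < best else best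
--     return best if best is not None else g + (remaining + 35) // 36
-- ===== SOURCE B (Python) =====
-- _LOOKUP = (0, 1, 1, 1, 2, 2)  # min count of {36,24,12}-coins for leftover 12*k, k=0..5
--
-- def calc_min_games(pts, hh=False):
--     """Calculate minimum games needed for given points."""
--     if pts <= 0:
--         return 0
--     remaining = pts // (2 if hh else 1)
--     g, r = divmod(remaining, 72)
--     if r % 12 == 0:
--         return g + _LOOKUP[r // 12]
--     return g + (r + 35) // 36
-- ===== Notes on version B (the rewrite author's own statement) =====
-- stated objective: simpler
-- what changed: Replaces A's bounded double search over (a,b) coin counts with a direct closed form: divmod by 72 plus a 6-entry lookup table for the divisible-by-12 leftover, reproducing A's fallback arithmetic otherwise; no loops at all.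
import Mathlib
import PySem

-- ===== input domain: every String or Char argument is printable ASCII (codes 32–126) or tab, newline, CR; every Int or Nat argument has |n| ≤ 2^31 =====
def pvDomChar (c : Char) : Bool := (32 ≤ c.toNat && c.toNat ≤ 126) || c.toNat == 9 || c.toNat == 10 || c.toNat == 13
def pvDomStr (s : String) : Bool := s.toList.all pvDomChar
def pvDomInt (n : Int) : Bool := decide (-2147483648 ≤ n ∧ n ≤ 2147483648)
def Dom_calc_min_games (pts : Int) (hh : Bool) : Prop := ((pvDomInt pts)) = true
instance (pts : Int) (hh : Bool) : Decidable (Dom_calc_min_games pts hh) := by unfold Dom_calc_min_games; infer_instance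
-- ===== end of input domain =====

-- B replaces A's double loop over coin counts by a divmod-by-72 plus a 6-entry lookup table (objective: simpler).

-- ===== PORT A =====
-- inner 'for b in range(...)' with its break, threading 'best'
def pvInnerA (g remaining a : Int) : List Int → Option Int → Option Int
  | [], best => best
  | b :: rest, best =>
    let rem := remaining - a*36 - b*24
    if rem < 0 then best
    else
      let best' :=
        if PySem.Int.mod rem 12 = 0 then
          let c := PySem.Int.floordiv rem 12
          let total := g + a + b + c
          match best with
          | none => some total
          | some bv => if total < bv then some total else some bv
        else best
      pvInnerA g remaining a rest best'

-- outer 'for a in range(...)'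
def pvOuterA (g remaining : Int) : List Int → Option Int → Option Int
  | [], best => best
  | a :: rest, best =>
      pvOuterA g remaining rest
        (pvInnerA g remaining a
          (PySem.List.pyRange 0 (PySem.Int.floordiv remaining 24 + 2) 1) best)

def calc_min_games (pts : Int) (hh : Bool) : Int :=
  if pts ≤ 0 then 0
  else
    let mult : Int := if hh then 2 else 1
    let remaining := PySem.Int.floordiv pts mult
    let g := PySem.Int.floordiv remaining 72
    let remaining2 := remaining - g * 72
    let best := pvOuterA g remaining2
      (PySem.List.pyRange 0 (PySem.Int.floordiv remaining2 36 + 2) 1) none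
    best.getD (g + PySem.Int.floordiv (remaining2 + 35) 36)

-- ===== PORT B =====
def calc_min_games_alt (pts : Int) (hh : Bool) : Int :=
  if pts ≤ 0 then 0
  else
    let remaining := PySem.Int.floordiv pts (if hh then 2 else 1)
    let g := PySem.Int.floordiv remaining 72
    let r := PySem.Int.mod remaining 72
    if PySem.Int.mod r 12 = 0 then
      -- _LOOKUP[r // 12]; the index is always in range (0 ≤ r < 72), getD never fires
      g + (PySem.List.pyGet? [(0:Int),1,1,1,2,2] (PySem.Int.floordiv r 12)).getD 0
    else g + PySem.Int.floordiv (r + 35) 36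

-- ===== PRECONDITION & SPEC =====
def Spec_calc_min_games (pts : Int) (hh : Bool) (out : Int) : Prop := out = calc_min_games_alt pts hh
instance (pts : Int) (hh : Bool) (out : Int) : Decidable (Spec_calc_min_games pts hh out) := by unfold Spec_calc_min_games; infer_instance

-- ===== CLAIM (what is proved, stated in full; the proofs are below) =====
def Claim_equal_calc_min_games : Prop := ∀ (pts : Int) (hh : Bool), Dom_calc_min_games pts hh → Spec_calc_min_games pts hh (calc_min_games pts hh)

-- ===== LEMMAS AND PROOFS =====

-- the inner loop with base offset g is the g = 0 loop shifted by g
lemma pvInnerA_shift (g r a : Int) (bs : List Int) (best : Option Int) :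
    pvInnerA g r a bs (Option.map (fun t => g + t) best)
      = Option.map (fun t => g + t) (pvInnerA 0 r a bs best) := by
  induction bs generalizing best with
  | nil => rfl
  | cons b rest ih =>
    simp only [pvInnerA]
    split_ifs with h1 h2
    · rfl
    · cases best with
      | none =>
        simp only [Option.map_none]
        have : g + a + b + PySem.Int.floordiv (r - a*36 - b*24) 12
            = g + (0 + a + b + PySem.Int.floordiv (r - a*36 - b*24) 12) := by ring
        rw [this, show (some (g + (0 + a + b + PySem.Int.floordiv (r - a*36 - b*24) 12)))
          = Option.map (fun t => g + t) (some (0 + a + b + PySem.Int.floordiv (r - a*36 - b*24) 12)) from rfl]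
        exact ih _
      | some bv =>
        simp only [Option.map_some]
        by_cases hlt : 0 + a + b + PySem.Int.floordiv (r - a*36 - b*24) 12 < bv
        · rw [if_pos (by omega : g + a + b + PySem.Int.floordiv (r - a*36 - b*24) 12 < g + bv),
            if_pos hlt]
          have : g + a + b + PySem.Int.floordiv (r - a*36 - b*24) 12
              = g + (0 + a + b + PySem.Int.floordiv (r - a*36 - b*24) 12) := by ring
          rw [this, show (some (g + (0 + a + b + PySem.Int.floordiv (r - a*36 - b*24) 12)))
            = Option.map (fun t => g + t) (some (0 + a + b + PySem.Int.floordiv (r - a*36 - b*24) 12)) from rfl]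
          exact ih _
        · rw [if_neg (by omega : ¬ g + a + b + PySem.Int.floordiv (r - a*36 - b*24) 12 < g + bv),
            if_neg hlt]
          exact ih (some bv)
    · exact ih best

lemma pvOuterA_shift (g r : Int) (as : List Int) (best : Option Int) :
    pvOuterA g r as (Option.map (fun t => g + t) best)
      = Option.map (fun t => g + t) (pvOuterA 0 r as best) := by
  induction as generalizing best with
  | nil => rfl
  | cons a rest ih =>
    simp only [pvOuterA]
    rw [pvInnerA_shift]
    exact ih _

lemma getD_map_add (g d : Int) (x : Option Int) :
    (Option.map (fun t => g + t) x).getD (g + d) = g + x.getD d := by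
  cases x <;> rfl

-- the g = 0 search over a leftover 0 ≤ r < 72 equals B's table/fallback value
lemma pvOuterA_closed (r : Int) (h0 : 0 ≤ r) (h1 : r < 72) :
    (pvOuterA 0 r (PySem.List.pyRange 0 (PySem.Int.floordiv r 36 + 2) 1) none).getD
        (PySem.Int.floordiv (r + 35) 36)
      = if PySem.Int.mod r 12 = 0 then
          (PySem.List.pyGet? [(0:Int),1,1,1,2,2] (PySem.Int.floordiv r 12)).getD 0
        else PySem.Int.floordiv (r + 35) 36 := by
  interval_cases r <;> decide

-- ===== VERDICT (by name: the statement is the Claim_ definition above) =====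
theorem calc_min_games_spec : Claim_equal_calc_min_games := by
  intro pts hh _
  show calc_min_games pts hh = calc_min_games_alt pts hh
  by_cases hp : pts ≤ 0
  · simp [calc_min_games, calc_min_games_alt, hp]
  · simp only [calc_min_games, calc_min_games_alt, if_neg hp]
    set remaining := PySem.Int.floordiv pts (if hh then (2:Int) else 1) with hrem
    set g := PySem.Int.floordiv remaining 72 with hg
    have hmod : remaining - g * 72 = PySem.Int.mod remaining 72 := by
      have := PySem.Int.floordiv_mul_add_mod remaining 72
      omega
    rw [hmod]
    set r := PySem.Int.mod remaining 72 with hr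
    have h0 : 0 ≤ r := PySem.Int.mod_nonneg remaining (by norm_num)
    have h1 : r < 72 := PySem.Int.mod_lt remaining (by norm_num)
    rw [show (none : Option Int) = Option.map (fun t => g + t) none from rfl,
      pvOuterA_shift, getD_map_add, pvOuterA_closed r h0 h1]
    split_ifs <;> rfl
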